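-- pv_equiv track=rewrite | github.com/ClayAucoin/BeamNG | beamng/extract/beamng_zip_extract_v3_popup.py | aggregate_field_values
-- ===== SOURCE A (Python) =====
-- from typing import Dict, List, Optional, Tuple
--
-- def aggregate_field_values(per_file_fields: List[Dict[str, str]]) -> Dict[str, str]:
--     agg: Dict[str, List[str]] = {}
--     for d in per_file_fields:
--         for k, v in d.items():
--             if v is None:
--                 continue
--             s = str(v).strip()
--             if not s:
--                 continue
--             if k not in agg:
--                 agg[k] = []
--             if s not in agg[k]:
--                 agg[k].append(s)
--     out: Dict[str, str] = {}
--     for k, vals in agg.items():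
--         out[k] = " | ".join(vals) if vals else ""
--     return out
-- ===== SOURCE B (Python) =====
-- from typing import Dict, List
--
-- def aggregate_field_values(per_file_fields: List[Dict[str, str]]) -> Dict[str, str]:
--     # Flatten everything once into an ordered stream of (key, stripped value) pairs.
--     flat = []
--     for d in per_file_fields:
--         for k, v in d.items():
--             if v is None:
--                 continue
--             s = str(v).strip()
--             if s:
--                 flat.append((k, s))
--     # Group by key with per-key scans over the flat stream: no dict of lists is ever built.
--     keys = list(dict.fromkeys(k for k, _ in flat))
--     return {k: " | ".join(dict.fromkeys(s for k2, s in flat if k2 == k)) for k in keys}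
-- ===== Notes on version B (the rewrite author's own statement) =====
-- stated objective: alternative
-- what changed: B never builds A's incrementally-deduped dict of per-key lists: it flattens all dicts once into an ordered (key, stripped value) stream, takes the distinct keys of that stream, and produces each output entry by an independent scan of the stream that collects and dedups that key's values.
import Mathlib
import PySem

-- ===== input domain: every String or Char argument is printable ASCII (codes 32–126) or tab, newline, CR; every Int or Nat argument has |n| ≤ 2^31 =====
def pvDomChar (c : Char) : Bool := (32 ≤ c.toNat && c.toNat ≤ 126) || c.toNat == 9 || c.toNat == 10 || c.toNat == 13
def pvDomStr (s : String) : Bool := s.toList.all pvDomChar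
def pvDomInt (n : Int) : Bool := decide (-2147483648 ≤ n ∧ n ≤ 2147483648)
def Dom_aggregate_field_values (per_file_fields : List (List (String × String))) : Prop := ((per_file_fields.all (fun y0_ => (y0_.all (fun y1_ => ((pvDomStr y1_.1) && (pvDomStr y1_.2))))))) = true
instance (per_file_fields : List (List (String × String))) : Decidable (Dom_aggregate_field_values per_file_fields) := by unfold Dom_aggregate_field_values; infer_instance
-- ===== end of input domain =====

-- B never builds a per-key dict of lists: it flattens once to an ordered (key, stripped value)
-- stream and then groups by key with per-key scans over that stream (alternative decomposition).
-- ===== PORT A =====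
def aggregate_field_values (per_file_fields : List (List (String × String))) : List (String × String) :=
  let agg : PySem.Dict String (List String) :=
    per_file_fields.foldl (fun agg d =>
      (PySem.Dict.ofList d).items.foldl (fun agg kv =>
        let s := PySem.Str.strip kv.2
        if s = "" then agg
        else
          let agg := if agg.contains kv.1 then agg else agg.insert kv.1 []
          let vs := agg.getD kv.1 []
          if s ∈ vs then agg else agg.insert kv.1 (vs ++ [s])) agg)
      PySem.Dict.empty
  let out : PySem.Dict String String :=
    agg.items.foldl (fun out p =>
      out.insert p.1 (if p.2 = [] then "" else PySem.Str.join " | " p.2)) PySem.Dict.empty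
  out.items

-- ===== PORT B =====
def aggregate_field_values_alt (per_file_fields : List (List (String × String))) : List (String × String) :=
  let flat : List (String × String) :=
    per_file_fields.foldl (fun flat d =>
      (PySem.Dict.ofList d).items.foldl (fun flat kv =>
        let s := PySem.Str.strip kv.2
        if s = "" then flat else flat ++ [(kv.1, s)]) flat) []
  let keys := PySem.List.dedup (flat.map Prod.fst)
  keys.map (fun k => (k, PySem.Str.join " | "
    (PySem.List.dedup ((flat.filter (fun p => p.1 == k)).map Prod.snd))))

-- ===== PRECONDITION & SPEC =====
def Spec_aggregate_field_values (per_file_fields : List (List (String × String))) (out : List (String × String)) : Prop := out = aggregate_field_values_alt per_file_fields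
instance (per_file_fields : List (List (String × String))) (out : List (String × String)) : Decidable (Spec_aggregate_field_values per_file_fields out) := by unfold Spec_aggregate_field_values; infer_instance

-- ===== CLAIM (what is proved, stated in full; the proofs are below) =====
def Claim_equal_aggregate_field_values : Prop := ∀ (per_file_fields : List (List (String × String))), Dom_aggregate_field_values per_file_fields → Spec_aggregate_field_values per_file_fields (aggregate_field_values per_file_fields)

-- ===== LEMMAS AND PROOFS =====

/-- The strip/guard step shared by both ports, as a `filterMap` function. -/
def fkv (kv : String × String) : Option (String × String) :=
  let s := PySem.Str.strip kv.2
  if s = "" then none else some (kv.1, s)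

/-- A's dict-updating step on an already stripped, non-empty pair. -/
def stepA (agg : PySem.Dict String (List String)) (kv : String × String) :
    PySem.Dict String (List String) :=
  let agg := if agg.contains kv.1 then agg else agg.insert kv.1 []
  let vs := agg.getD kv.1 []
  if kv.2 ∈ vs then agg else agg.insert kv.1 (vs ++ [kv.2])

/-- The grouped view of a flat (key, value) stream: keys in first-appearance order,
    each with its deduped values in first-appearance order. -/
def G (ps : List (String × String)) : List (String × List String) :=
  (PySem.List.dedup (ps.map Prod.fst)).map (fun k =>
    (k, PySem.List.dedup ((ps.filter (fun p => p.1 == k)).map Prod.snd)))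

theorem find_self {l : List String} {k : String} (h : k ∈ l) :
    l.find? (fun x => x == k) = some k := by
  induction l with
  | nil => cases h
  | cons a l ih =>
    rcases List.mem_cons.mp h with h1 | h1
    · simp [List.find?_cons, h1]
    · by_cases ha : a = k
      · simp [List.find?_cons, ha]
      · have hb : (a == k) = false := by simpa using ha
        simp only [List.find?_cons, hb]
        exact ih h1

theorem foldA_filterMap (l : List (String × String)) :
    ∀ (init : PySem.Dict String (List String)),
    l.foldl (fun agg kv =>
        let s := PySem.Str.strip kv.2
        if s = "" then agg
        else
          let agg := if agg.contains kv.1 then agg else agg.insert kv.1 []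
          let vs := agg.getD kv.1 []
          if s ∈ vs then agg else agg.insert kv.1 (vs ++ [s])) init
      = (l.filterMap fkv).foldl stepA init := by
  induction l with
  | nil => intro init; rfl
  | cons kv l ih =>
    intro init
    simp only [List.foldl_cons, List.filterMap_cons]
    by_cases hs : PySem.Str.strip kv.2 = ""
    · simp only [hs, if_pos, fkv, if_true]
      exact ih init
    · simp only [hs, if_neg, ite_false, fkv, if_false]
      simp only [List.foldl_cons]
      rw [ih]
      rfl

theorem foldB_filterMap (l : List (String × String)) :
    ∀ (acc : List (String × String)),
    l.foldl (fun fl kv =>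
        let s := PySem.Str.strip kv.2
        if s = "" then fl else fl ++ [(kv.1, s)]) acc
      = acc ++ l.filterMap fkv := by
  induction l with
  | nil => intro acc; simp
  | cons kv l ih =>
    intro acc
    simp only [List.foldl_cons, List.filterMap_cons]
    by_cases hs : PySem.Str.strip kv.2 = ""
    · simp only [hs, if_pos, fkv, if_true]
      exact ih acc
    · simp only [hs, if_neg, ite_false, fkv, if_false]
      rw [ih, List.append_assoc]
      rfl

theorem G_keys_nodup (ps : List (String × String)) : ((G ps).map Prod.fst).Nodup := by
  have : (G ps).map Prod.fst = PySem.List.dedup (ps.map Prod.fst) := by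
    simp [G, List.map_map, Function.comp_def]
  rw [this, PySem.List.dedup_eq_ofList]
  exact PySem.Set.nodup_ofList _

theorem filter_append_pair (ps : List (String × String)) (k s k' : String) :
    (ps ++ [(k, s)]).filter (fun p => p.1 == k')
      = ps.filter (fun p => p.1 == k') ++ (if k = k' then [(k, s)] else []) := by
  rw [List.filter_append]
  by_cases h : k = k' <;> simp [h]

theorem vals_append (ps : List (String × String)) (k s k' : String) :
    (((ps ++ [(k, s)]).filter (fun p => p.1 == k')).map Prod.snd)
      = (ps.filter (fun p => p.1 == k')).map Prod.snd ++ (if k = k' then [s] else []) := by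
  rw [filter_append_pair]
  by_cases h : k = k' <;> simp [h]

theorem stepA_G (ps : List (String × String)) (k s : String) :
    stepA (PySem.Dict.mk (G ps)) (k, s) = PySem.Dict.mk (G (ps ++ [(k, s)])) := by
  have hkeys : PySem.List.dedup ((ps ++ [(k, s)]).map Prod.fst)
      = (PySem.Set.ofList (ps.map Prod.fst)).add k := by
    rw [List.map_append, List.map_cons, List.map_nil, PySem.List.dedup_eq_ofList,
      PySem.Set.ofList_append_singleton]
  have hcont : (PySem.Dict.mk (G ps)).contains k
      = (PySem.List.dedup (ps.map Prod.fst)).any (fun k' => k' == k) := by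
    simp [PySem.Dict.contains, G, List.any_map, Function.comp_def]
  by_cases hk : k ∈ ps.map Prod.fst
  · -- key already present
    have hk' : k ∈ PySem.List.dedup (ps.map Prod.fst) := by
      rw [PySem.List.dedup_eq_ofList]; exact (PySem.Set.mem_ofList _ _).mpr hk
    have hc : (PySem.Dict.mk (G ps)).contains k = true := by
      rw [hcont, List.any_eq_true]
      exact ⟨k, hk', by simp⟩
    have hget : (PySem.Dict.mk (G ps)).getD k []
        = PySem.List.dedup ((ps.filter (fun p => p.1 == k)).map Prod.snd) := by
      simp only [PySem.Dict.getD, PySem.Dict.get?, G, List.find?_map]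
      rw [show ((fun p : String × List String => p.1 == k) ∘ (fun k' =>
        (k', PySem.List.dedup ((ps.filter (fun p => p.1 == k')).map Prod.snd))))
        = (fun x => x == k) from rfl, find_self hk']
      rfl
    have hkeys' : PySem.List.dedup ((ps ++ [(k, s)]).map Prod.fst)
        = PySem.List.dedup (ps.map Prod.fst) := by
      rw [hkeys, PySem.Set.add_of_mem (by rw [PySem.List.dedup_eq_ofList] at hk'; exact hk'),
        ← PySem.List.dedup_eq_ofList]
    by_cases hs : s ∈ PySem.List.dedup ((ps.filter (fun p => p.1 == k)).map Prod.snd)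
    · -- duplicate value: dict unchanged, and G unchanged too
      have hded : PySem.List.dedup ((ps.filter (fun p => p.1 == k)).map Prod.snd ++ [s])
          = PySem.List.dedup ((ps.filter (fun p => p.1 == k)).map Prod.snd) := by
        rw [PySem.List.dedup_eq_ofList, PySem.Set.ofList_append_singleton,
          PySem.Set.add_of_mem (by rw [PySem.List.dedup_eq_ofList] at hs; exact hs),
          ← PySem.List.dedup_eq_ofList]
      simp only [stepA, hc, if_pos, hget, hs]
      congr 1
      unfold G
      rw [hkeys']
      apply List.map_congr_left
      intro k' _
      rw [vals_append]
      by_cases he : k = k'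
      · subst he
        rw [if_pos rfl, hded]
      · simp [he]
    · -- new value appended at key k
      have hded : PySem.List.dedup ((ps.filter (fun p => p.1 == k)).map Prod.snd ++ [s])
          = PySem.List.dedup ((ps.filter (fun p => p.1 == k)).map Prod.snd) ++ [s] := by
        rw [PySem.List.dedup_eq_ofList, PySem.Set.ofList_append_singleton,
          PySem.Set.add_of_not_mem (by rw [PySem.List.dedup_eq_ofList] at hs; exact hs),
          ← PySem.List.dedup_eq_ofList]
      simp only [stepA, hc, if_pos, hget, hs, ite_false]
      apply congrArg PySem.Dict.mk ∘ Eq.trans (PySem.Dict.items_insert_of_contains _ _ hc)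
      unfold G
      rw [hkeys', List.map_map]
      apply List.map_congr_left
      intro k' _
      simp only [Function.comp_def]
      rw [vals_append]
      by_cases he : k' = k
      · subst he
        rw [if_pos rfl, beq_self_eq_true, if_pos rfl, hded]
      · have hb : (k' == k) = false := by simpa using he
        have hb2 : ¬ k = k' := fun h => he h.symm
        simp [hb, hb2]
  · -- fresh key
    have hk' : k ∉ PySem.List.dedup (ps.map Prod.fst) := by
      rw [PySem.List.dedup_eq_ofList]
      exact fun h => hk ((PySem.Set.mem_ofList _ _).mp h)
    have hc : (PySem.Dict.mk (G ps)).contains k = false := by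
      rw [hcont, List.any_eq_false]
      intro k' hm
      simp only [beq_iff_eq]
      exact fun he => hk' (he ▸ hm)
    have hkeys' : PySem.List.dedup ((ps ++ [(k, s)]).map Prod.fst)
        = PySem.List.dedup (ps.map Prod.fst) ++ [k] := by
      rw [hkeys, PySem.Set.add_of_not_mem (by rw [PySem.List.dedup_eq_ofList] at hk'; exact hk'),
        ← PySem.List.dedup_eq_ofList]
    have hfilter_nil : ps.filter (fun p => p.1 == k) = [] := by
      rw [List.filter_eq_nil_iff]
      intro p hp
      simp only [beq_iff_eq]
      exact fun he => hk (he ▸ List.mem_map_of_mem hp)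
    have hnomatch : ∀ q ∈ G ps, (q.1 == k) = false := by
      intro q hq
      have : q.1 ∈ (G ps).map Prod.fst := List.mem_map_of_mem hq
      have : q.1 ∈ PySem.List.dedup (ps.map Prod.fst) := by
        simpa [G, List.map_map, Function.comp_def] using this
      simp only [beq_eq_false_iff_ne, ne_eq]
      exact fun he => hk' (he ▸ this)
    have hitems1 : ((PySem.Dict.mk (G ps)).insert k ([] : List String)).items
        = G ps ++ [(k, [])] := PySem.Dict.items_insert_of_not_contains _ _ hc
    have hget : ((PySem.Dict.mk (G ps)).insert k ([] : List String)).getD k [] = [] := by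
      simp only [PySem.Dict.getD, PySem.Dict.get?]
      rw [hitems1, List.find?_append]
      have : (G ps).find? (fun p => p.1 == k) = none := by
        rw [List.find?_eq_none]
        intro q hq
        simp [hnomatch q hq]
      simp [this]
    have hc2 : ((PySem.Dict.mk (G ps)).insert k ([] : List String)).contains k = true := by
      simp only [PySem.Dict.contains, hitems1, List.any_append]
      simp
    simp only [stepA, hc, Bool.false_eq_true, if_false, hget, List.not_mem_nil,
      if_false, List.nil_append]
    apply congrArg PySem.Dict.mk ∘ Eq.trans (PySem.Dict.items_insert_of_contains _ _ hc2)
    rw [hitems1, List.map_append]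
    unfold G
    rw [hkeys', List.map_append, List.map_cons, List.map_nil]
    congr 1
    · rw [List.map_map]
      apply List.map_congr_left
      intro k' hm
      have hne : (k' == k) = false := by
        simp only [beq_eq_false_iff_ne, ne_eq]
        exact fun he => hk' (he ▸ hm)
      have : ((fun k'' => (k'', PySem.List.dedup ((ps.filter (fun p => p.1 == k'')).map Prod.snd))) k').1 = k' := rfl
      simp only [Function.comp_def, hne, Bool.false_eq_true, if_false]
      rw [filter_append_pair]
      have hne2 : ¬ k = k' := by
        intro he
        rw [he] at hne
        simp at hne
      simp [hne2]
    · have hmapnil : (ps.filter (fun p => p.1 == k)).map Prod.snd = [] := by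
        rw [hfilter_nil]; rfl
      simp [hmapnil, PySem.List.dedup, PySem.Set.ofList, PySem.Set.add,
        PySem.Set.contains]

theorem fold_stepA (ps : List (String × String)) :
    ps.foldl stepA PySem.Dict.empty = PySem.Dict.mk (G ps) := by
  induction ps using List.reverseRecOn with
  | nil => rfl
  | append_singleton ps p ih =>
    rw [List.foldl_append, List.foldl_cons, List.foldl_nil, ih]
    exact stepA_G ps p.1 p.2

theorem build_out {ν : Type} (g : String × ν → String) (l : List (String × ν)) :
    ∀ (d : PySem.Dict String String), (∀ p ∈ l, d.contains p.1 = false) →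
    (l.map Prod.fst).Nodup →
    (l.foldl (fun out p => out.insert p.1 (g p)) d).items
      = d.items ++ l.map (fun p => (p.1, g p)) := by
  induction l with
  | nil => intro d _ _; simp
  | cons p l ih =>
    intro d hd hnd
    obtain ⟨hh, ht⟩ : (∀ x : ν, (p.1, x) ∉ l) ∧ (l.map Prod.fst).Nodup := by
      simpa using hnd
    simp only [List.foldl_cons]
    have h1 : (d.insert p.1 (g p)).items = d.items ++ [(p.1, g p)] :=
      PySem.Dict.items_insert_of_not_contains _ _ (hd p (by simp))
    have h2 : ∀ q ∈ l, (d.insert p.1 (g p)).contains q.1 = false := by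
      intro q hq
      rw [PySem.Dict.contains_insert]
      have hq1 : ¬ (q.1 = p.1) := by
        intro he
        have : (q.1, q.2) ∈ l := by simpa using hq
        rw [he] at this
        exact hh q.2 this
      simp [hq1, hd q (List.mem_cons_of_mem _ hq)]
    rw [ih _ h2 ht, h1]
    simp

theorem join_of_ite (vs : List String) :
    (if vs = [] then "" else PySem.Str.join " | " vs) = PySem.Str.join " | " vs := by
  by_cases h : vs = []
  · rw [if_pos h, h]; rfl
  · rw [if_neg h]

theorem main_eq (pff : List (List (String × String))) :
    aggregate_field_values pff = aggregate_field_values_alt pff := by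
  unfold aggregate_field_values aggregate_field_values_alt
  simp only []
  -- rewrite both nested folds as folds/appends over the flat stream
  rw [show (pff.foldl (fun agg d =>
      (PySem.Dict.ofList d).items.foldl (fun agg kv =>
        let s := PySem.Str.strip kv.2
        if s = "" then agg
        else
          let agg := if agg.contains kv.1 then agg else agg.insert kv.1 []
          let vs := agg.getD kv.1 []
          if s ∈ vs then agg else agg.insert kv.1 (vs ++ [s])) agg)
      PySem.Dict.empty)
    = ((pff.flatMap (fun d => (PySem.Dict.ofList d).items)).foldl (fun agg kv =>
        let s := PySem.Str.strip kv.2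
        if s = "" then agg
        else
          let agg := if agg.contains kv.1 then agg else agg.insert kv.1 []
          let vs := agg.getD kv.1 []
          if s ∈ vs then agg else agg.insert kv.1 (vs ++ [s])) PySem.Dict.empty)
    from (List.foldl_flatMap).symm ▸ rfl]
  rw [show (pff.foldl (fun fl d =>
      (PySem.Dict.ofList d).items.foldl (fun fl kv =>
        let s := PySem.Str.strip kv.2
        if s = "" then fl else fl ++ [(kv.1, s)]) fl) [])
    = ((pff.flatMap (fun d => (PySem.Dict.ofList d).items)).foldl (fun fl kv =>
        let s := PySem.Str.strip kv.2
        if s = "" then fl else fl ++ [(kv.1, s)]) [])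
    from (List.foldl_flatMap).symm ▸ rfl]
  set raw := pff.flatMap (fun d => (PySem.Dict.ofList d).items) with hraw
  rw [foldA_filterMap raw PySem.Dict.empty, foldB_filterMap raw [], List.nil_append]
  set flat := raw.filterMap fkv with hflat
  rw [fold_stepA flat]
  rw [build_out _ _ PySem.Dict.empty (fun p _ => PySem.Dict.contains_empty p.1)
    (G_keys_nodup flat)]
  rw [show (PySem.Dict.empty : PySem.Dict String String).items = [] from rfl, List.nil_append]
  unfold G
  rw [List.map_map]
  apply List.map_congr_left
  intro k _
  simp only [Function.comp_def]
  rw [join_of_ite]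

-- ===== VERDICT (by name: the statement is the Claim_ definition above) =====
theorem aggregate_field_values_spec : Claim_equal_aggregate_field_values := by
  intro per_file_fields _
  unfold Spec_aggregate_field_values
  exact (main_eq per_file_fields)
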